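-- pv_equiv track=rewrite | github.com/berkedilekoglu/SUMOnet-webserver | utils/sequence_manipulations.py | protein_sequence_input
-- ===== SOURCE A (Python) =====
-- from typing import List, Tuple
--
-- def extract_subseq_with_k_position(sequence:str,position:int) -> str:
--
--     """
--     Take protein sequence and 'K' position as an input and find 21-mer which includes 'K' at the middle. Use padding with 'X'.
--
--     Parameters:
--         sequence (str): Amino acid sequence of the protein.
--         position (int): Position of the 'K'. It is not array index. Position is index + 1.
--
--     Returns:
--         str: 21-mer which includes 'K' at the middle
--     """
--
--     half_mer_len = 10
--
--     i = position - 1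
--
--     if sequence[i] == 'K':
--
--         left_side = sequence[max(0,i-half_mer_len):i]
--         right_side = sequence[i+1:i+1+half_mer_len]
--
--         if len(left_side) < 10:
--
--             left_side = 'X' * (10-len(left_side)) + left_side
--
--         if len(right_side) < 10:
--
--             right_side = right_side + 'X' * (10-len(right_side))
--
--
--         subseq = left_side + 'K' + right_side
--
--         return subseq
--
--     else:
--         #Todo:
--         #Giving an error might be better
--         #User should be noticed for that situation!
--         return None
--
-- def find_mers_with_K(sequence:str) -> list:
--
--     """
--     Take protein sequence as an input and find each 21-mer which includes 'K' at the middle. Use padding with 'X'.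
--
--     Parameters:
--         sequence (str): Amino acid sequence of the protein.
--
--     Returns:
--         list: List of 21-mers which includes 'K' at the middle
--     """
--
--     mers = []
--     k_positions = []
--     for i in range(len(sequence)):
--
--         if sequence[i] == 'K':
--             position = i+1
--             subseq = extract_subseq_with_k_position(sequence,position)
--
--
--             mers.append(subseq)
--             k_positions.append(position)
--
--     return mers, k_positions
--
-- def protein_sequence_input(sequence_fasta_list:List[str]) -> Tuple[List[str], List[str]]:
--
--     protein_ids, protein_seqs,k_positions = [], [], []
--
--     for index, item in enumerate(sequence_fasta_list):
--
--         if index % 2 == 0: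
--
--             protein_id = item
--
--         else:
--
--             mers, k_position = find_mers_with_K(item)
--
--             protein_seqs += mers
--             k_positions += k_position
--             protein_ids += [protein_id] * len(mers)
--
--
--     return protein_ids, protein_seqs, k_positions
-- ===== SOURCE B (Python) =====
-- def protein_sequence_input(sequence_fasta_list):
--     protein_ids, protein_seqs, k_positions = [], [], []
--     it = iter(sequence_fasta_list)
--     for protein_id, seq in zip(it, it):
--         padded = 'X' * 10 + seq + 'X' * 10
--         for i, aa in enumerate(seq):
--             if aa == 'K':
--                 protein_ids.append(protein_id)
--                 protein_seqs.append(padded[i:i + 21])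
--                 k_positions.append(i + 1)
--     return protein_ids, protein_seqs, k_positions
-- ===== Notes on version B (the rewrite author's own statement) =====
-- stated objective: simpler
-- what changed: B pairs ids with sequences via zip over one iterator instead of enumerate-parity with a carried id, and builds each 21-mer as a fixed-width slice of a once-padded buffer 'X'*10+seq+'X'*10 instead of per-side max()/length/padding branches, appending to the three output lists interleaved per K instead of per-sequence extends.
import Mathlib
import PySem

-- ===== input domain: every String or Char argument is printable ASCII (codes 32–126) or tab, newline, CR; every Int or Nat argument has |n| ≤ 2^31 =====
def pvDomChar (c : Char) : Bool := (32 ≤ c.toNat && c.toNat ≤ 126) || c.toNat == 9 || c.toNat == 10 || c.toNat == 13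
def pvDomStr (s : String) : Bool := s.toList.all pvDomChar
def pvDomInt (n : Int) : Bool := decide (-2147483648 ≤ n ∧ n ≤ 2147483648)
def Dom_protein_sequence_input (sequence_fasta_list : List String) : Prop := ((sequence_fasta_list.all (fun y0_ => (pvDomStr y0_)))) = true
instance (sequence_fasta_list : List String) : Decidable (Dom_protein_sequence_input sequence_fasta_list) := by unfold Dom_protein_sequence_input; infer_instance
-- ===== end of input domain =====

-- B pairs ids/sequences by zipping one iterator and emits each 21-mer as one fixed-width slice of a
-- pre-padded buffer, instead of A's enumerate-parity id carrying and per-side max/length/padding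
-- branches (objective: simpler).

-- ===== PORT A =====
-- Python strings are handled on the List Char side (PySem.Chars), wrapped back with String.ofList.
def extract_subseq_with_k_position (sequence : String) (position : Int) : Option String :=
  let s := sequence.toList
  let half_mer_len : Int := 10
  let i := position - 1
  -- sequence[i]: every call site passes an in-range i (find_mers_with_K iterates i < len), so the
  -- total form pyGetD is exact here (Python's IndexError is unreachable from A's callers)
  if PySem.List.pyGetD s i ' ' = 'K' then
    let left_side := PySem.Chars.slice s (some (max 0 (i - half_mer_len))) (some i)
    let left_side := if left_side.length < 10 then List.replicate (10 - left_side.length) 'X' ++ left_side else left_side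
    let right_side := PySem.Chars.slice s (some (i + 1)) (some (i + 1 + half_mer_len))
    let right_side := if right_side.length < 10 then right_side ++ List.replicate (10 - right_side.length) 'X' else right_side
    some (String.ofList (left_side ++ ['K'] ++ right_side))
  else
    none  -- Python returns None

def find_mers_with_K (sequence : String) : List String × List Int :=
  let s := sequence.toList
  (PySem.List.pyRange 0 (PySem.List.len s) 1).foldl
    (fun (acc : List String × List Int) i =>
      if PySem.List.pyGetD s i ' ' = 'K' then
        -- the guard guarantees extract_… returns some, so Python never appends None here
        (acc.1 ++ [(extract_subseq_with_k_position sequence (i + 1)).getD ""], acc.2 ++ [i + 1])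
      else acc)
    ([], [])

def protein_sequence_input (sequence_fasta_list : List String) : List String × List String × List Int :=
  let r := (PySem.List.enumerate sequence_fasta_list).foldl
    (fun (acc : List String × List String × List Int × String) p =>
      if PySem.Int.mod p.1 2 = 0 then
        (acc.1, acc.2.1, acc.2.2.1, p.2)      -- protein_id = item
      else
        let mk := find_mers_with_K p.2
        (acc.1 ++ PySem.List.pyRepeat [acc.2.2.2] (PySem.List.len mk.1),
         acc.2.1 ++ mk.1, acc.2.2.1 ++ mk.2, acc.2.2.2))
    ([], [], [], "")  -- the initial "" models Python's undefined protein_id; index 0 is even, so it is never read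
  (r.1, r.2.1, r.2.2.1)

-- ===== PORT B =====
-- 'zip(it, it)' over one iterator: consecutive disjoint pairs, a trailing unpaired element dropped
def pairsOfAlt : List String → List (String × String)
  | [] => []
  | [_] => []
  | x :: y :: rest => (x, y) :: pairsOfAlt rest

def protein_sequence_input_alt (sequence_fasta_list : List String) : List String × List String × List Int :=
  (pairsOfAlt sequence_fasta_list).foldl
    (fun (acc : List String × List String × List Int) pq =>
      let s := pq.2.toList
      let padded := List.replicate 10 'X' ++ s ++ List.replicate 10 'X'   -- 'X'*10 + seq + 'X'*10
      (PySem.List.enumerate s).foldl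
        (fun (a2 : List String × List String × List Int) p =>
          if p.2 = 'K' then
            (a2.1 ++ [pq.1],
             a2.2.1 ++ [String.ofList (PySem.Chars.slice padded (some p.1) (some (p.1 + 21)))],
             a2.2.2 ++ [p.1 + 1])
          else a2)
        acc)
    ([], [], [])

-- ===== PRECONDITION & SPEC =====
def Spec_protein_sequence_input (sequence_fasta_list : List String) (out : List String × List String × List Int) : Prop := out = protein_sequence_input_alt sequence_fasta_list
instance (sequence_fasta_list : List String) (out : List String × List String × List Int) : Decidable (Spec_protein_sequence_input sequence_fasta_list out) := by unfold Spec_protein_sequence_input; infer_instance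

-- ===== CLAIM (what is proved, stated in full; the proofs are below) =====
def Claim_equal_protein_sequence_input : Prop := ∀ (sequence_fasta_list : List String), Dom_protein_sequence_input sequence_fasta_list → Spec_protein_sequence_input sequence_fasta_list (protein_sequence_input sequence_fasta_list)

-- ===== LEMMAS AND PROOFS =====

-- K indices (as Python ints) of a sequence: the backbone both programs filter on
def kIdx (s : List Char) : List Int :=
  (PySem.List.pyRange 0 (PySem.List.len s) 1).filter (fun i => decide (PySem.List.pyGetD s i ' ' = 'K'))

def padX : List Char := List.replicate 10 'X'

def winB (s : List Char) (i : Int) : String :=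
  String.ofList (PySem.Chars.slice (padX ++ s ++ padX) (some i) (some (i + 21)))

-- the per-(id, sequence)-pair contribution to the three output lists, in B's form
def contrib (p : String × String) : List String × List String × List Int :=
  ((kIdx p.2.toList).map (fun _ => p.1),
   (kIdx p.2.toList).map (winB p.2.toList),
   (kIdx p.2.toList).map (· + 1))

-- A's padded window around a 'K' equals the fixed-width slice of the pre-padded buffer
theorem core_window (s : List Char) (n : Nat) (hn : n < s.length) (hK : s[n] = 'K') :
    (if ((s.drop (n-10)).take (n - (n-10))).length < 10
       then List.replicate (10 - ((s.drop (n-10)).take (n - (n-10))).length) 'X' ++ (s.drop (n-10)).take (n - (n-10))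
       else (s.drop (n-10)).take (n - (n-10))) ++ ['K'] ++
    (if ((s.drop (n+1)).take 10).length < 10
       then (s.drop (n+1)).take 10 ++ List.replicate (10 - ((s.drop (n+1)).take 10).length) 'X'
       else (s.drop (n+1)).take 10)
    = ((List.replicate 10 'X' ++ s ++ List.replicate 10 'X').drop n).take 21 := by
  set L0 := (s.drop (n-10)).take (n - (n-10)) with hL0
  set R0 := (s.drop (n+1)).take 10 with hR0
  have hLlen : L0.length = n - (n - 10) := by
    rw [hL0, List.length_take, List.length_drop]; omega
  have hRlen : R0.length = min 10 (s.length - (n+1)) := by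
    rw [hR0, List.length_take, List.length_drop]
  have hL : (if L0.length < 10 then List.replicate (10 - L0.length) 'X' ++ L0 else L0)
      = List.replicate (10 - L0.length) 'X' ++ L0 := by
    split_ifs with h
    · rfl
    · have : 10 - L0.length = 0 := by omega
      simp [this]
  have hR : (if R0.length < 10 then R0 ++ List.replicate (10 - R0.length) 'X' else R0)
      = R0 ++ List.replicate (10 - R0.length) 'X' := by
    split_ifs with h
    · rfl
    · have : 10 - R0.length = 0 := by omega
      simp [this]
  rw [hL, hR]
  have hs : s = s.take n ++ (s[n] :: s.drop (n+1)) := by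
    rw [List.getElem_cons_drop hn, List.take_append_drop]
  conv_rhs => rw [hs]
  simp only [List.append_assoc, List.cons_append]
  rw [List.drop_append, List.drop_append, List.drop_replicate]
  have htk : (s.take n).length = n := by rw [List.length_take]; omega
  simp only [List.length_replicate, htk]
  rw [show n - 10 - n = 0 from by omega, List.drop_zero, List.drop_take, ← hL0]
  have hdr : (s.drop (n+1)).length = s.length - (n+1) := by rw [List.length_drop]
  rw [List.take_append, List.take_append, List.take_replicate]
  rw [show min 21 (10-n) = 10 - n from by omega]
  simp only [List.length_replicate]
  rw [List.take_of_length_le (by omega : L0.length ≤ 21 - (10-n))]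
  rw [show 21 - (10-n) - L0.length = 10 + 1 from by omega]
  rw [List.take_succ_cons, List.take_append, ← hR0, List.take_replicate, hK]
  rw [show min (10 - (s.drop (n+1)).length) 10 = 10 - R0.length from by omega]
  rw [show 10 - L0.length = 10 - n from by omega]
  simp

theorem window_eq (seq : String) (n : Nat) (hn : n < seq.toList.length)
    (hK : PySem.List.pyGetD seq.toList (n : Int) ' ' = 'K') :
    (extract_subseq_with_k_position seq ((n : Int) + 1)).getD ""
      = winB seq.toList (n : Int) := by
  set s := seq.toList with hseq
  have hK' : s[n] = 'K' := by
    rw [PySem.List.pyGetD_natCast, List.getD_eq_getElem?_getD, List.getElem?_eq_getElem hn] at hK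
    simpa using hK
  have hsl : PySem.Chars.slice s (some (max 0 ((n:Int) - 10))) (some (n:Int))
      = (s.drop (n-10)).take (n-(n-10)) := by
    show PySem.List.slice s _ _ = _
    rw [PySem.List.slice_toNat s (le_max_left _ _) (by positivity),
        show (max 0 ((n:Int) - 10)).toNat = n - 10 from by omega,
        show ((n:Int)).toNat = n from by omega]
  have hsr : PySem.Chars.slice s (some ((n:Int) + 1)) (some ((n:Int) + 1 + 10))
      = (s.drop (n+1)).take 10 := by
    show PySem.List.slice s _ _ = _
    rw [PySem.List.slice_toNat s (by positivity) (by positivity),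
        show ((n:Int) + 1).toNat = n + 1 from by omega,
        show ((n:Int) + 1 + 10).toNat = n + 11 from by omega,
        show n + 11 - (n + 1) = 10 from by omega]
  have hsb : PySem.Chars.slice (padX ++ s ++ padX) (some (n:Int)) (some ((n:Int) + 21))
      = ((padX ++ s ++ padX).drop n).take 21 := by
    show PySem.List.slice _ _ _ = _
    rw [PySem.List.slice_toNat _ (by positivity) (by positivity),
        show ((n:Int) + 21).toNat = n + 21 from by omega,
        show ((n:Int)).toNat = n from by omega,
        show n + 21 - n = 21 from by omega]
  unfold extract_subseq_with_k_position winB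
  simp only [← hseq, add_sub_cancel_right, hK, if_pos, hsl, hsr, hsb, Option.getD_some]
  unfold padX
  rw [core_window s n hn hK']

theorem find_eq (seq : String) :
    find_mers_with_K seq
      = ((kIdx seq.toList).map (winB seq.toList), (kIdx seq.toList).map (· + 1)) := by
  show (let s := seq.toList;
    (PySem.List.pyRange 0 (PySem.List.len s) 1).foldl
      (fun (acc : List String × List Int) i =>
        if PySem.List.pyGetD s i ' ' = 'K' then
          (acc.1 ++ [(extract_subseq_with_k_position seq (i + 1)).getD ""], acc.2 ++ [i + 1])
        else acc) ([], [])) = _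
  simp only []
  rw [PySem.List.foldl_congr_mem (PySem.List.pyRange 0 (PySem.List.len seq.toList) 1)
      (fun (acc : List String × List Int) i =>
        if PySem.List.pyGetD seq.toList i ' ' = 'K' then
          (acc.1 ++ [(extract_subseq_with_k_position seq (i + 1)).getD ""], acc.2 ++ [i + 1])
        else acc)
      (fun (acc : List String × List Int) i =>
        (if PySem.List.pyGetD seq.toList i ' ' = 'K' then acc.1 ++ [(extract_subseq_with_k_position seq (i + 1)).getD ""] else acc.1,
         if PySem.List.pyGetD seq.toList i ' ' = 'K' then acc.2 ++ [i + 1] else acc.2))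
      ([], []) (by intro acc x _; dsimp only; split_ifs <;> rfl)]
  rw [PySem.List.foldl_prod_mk
      (f := fun (a : List String) i =>
        if PySem.List.pyGetD seq.toList i ' ' = 'K' then a ++ [(extract_subseq_with_k_position seq (i + 1)).getD ""] else a)
      (g := fun (a : List Int) i =>
        if PySem.List.pyGetD seq.toList i ' ' = 'K' then a ++ [i + 1] else a)]
  rw [PySem.List.foldl_append_ite, PySem.List.foldl_append_ite]
  simp only [List.nil_append]
  unfold kIdx
  refine Prod.ext ?_ rfl
  refine List.map_congr_left ?_
  intro i hi
  rw [List.mem_filter] at hi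
  obtain ⟨hmem, hKi⟩ := hi
  rw [PySem.List.mem_pyRange_one, PySem.List.len_eq] at hmem
  have hKd : PySem.List.pyGetD seq.toList i ' ' = 'K' := of_decide_eq_true hKi
  have hi' : i = ((i.toNat : Nat) : Int) := by omega
  rw [hi'] at hKd ⊢
  exact window_eq seq i.toNat (by omega) hKd

theorem innerB_eq (pid : String) (seq : String) (acc : List String × List String × List Int) :
    (PySem.List.enumerate seq.toList).foldl
        (fun (a2 : List String × List String × List Int) p =>
          if p.2 = 'K' then
            (a2.1 ++ [pid],
             a2.2.1 ++ [String.ofList (PySem.Chars.slice (List.replicate 10 'X' ++ seq.toList ++ List.replicate 10 'X') (some p.1) (some (p.1 + 21)))],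
             a2.2.2 ++ [p.1 + 1])
          else a2) acc
      = (acc.1 ++ (contrib (pid, seq)).1, acc.2.1 ++ (contrib (pid, seq)).2.1, acc.2.2 ++ (contrib (pid, seq)).2.2) := by
  obtain ⟨a1, a2, a3⟩ := acc
  rw [PySem.List.enumerate_eq_map_pyRange seq.toList ' ', List.foldl_map]
  dsimp only
  rw [PySem.List.foldl_congr_mem (PySem.List.pyRange 0 (PySem.List.len seq.toList) 1)
      (fun (x : List String × List String × List Int) y =>
        if PySem.List.pyGetD seq.toList y ' ' = 'K' then
          (x.1 ++ [pid],
           x.2.1 ++ [String.ofList (PySem.Chars.slice (List.replicate 10 'X' ++ seq.toList ++ List.replicate 10 'X') (some y) (some (y + 21)))],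
           x.2.2 ++ [y + 1])
        else x)
      (fun (x : List String × List String × List Int) y =>
        (if PySem.List.pyGetD seq.toList y ' ' = 'K' then x.1 ++ [pid] else x.1,
         if PySem.List.pyGetD seq.toList y ' ' = 'K' then x.2.1 ++ [String.ofList (PySem.Chars.slice (List.replicate 10 'X' ++ seq.toList ++ List.replicate 10 'X') (some y) (some (y + 21)))] else x.2.1,
         if PySem.List.pyGetD seq.toList y ' ' = 'K' then x.2.2 ++ [y + 1] else x.2.2))
      (a1, a2, a3) (by intro x i _; dsimp only; split_ifs <;> rfl)]
  rw [PySem.List.foldl_prod_mk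
      (f := fun (a : List String) y =>
        if PySem.List.pyGetD seq.toList y ' ' = 'K' then a ++ [pid] else a)
      (g := fun (x : List String × List Int) y =>
        (if PySem.List.pyGetD seq.toList y ' ' = 'K' then x.1 ++ [String.ofList (PySem.Chars.slice (List.replicate 10 'X' ++ seq.toList ++ List.replicate 10 'X') (some y) (some (y + 21)))] else x.1,
         if PySem.List.pyGetD seq.toList y ' ' = 'K' then x.2 ++ [y + 1] else x.2))]
  rw [PySem.List.foldl_prod_mk
      (f := fun (a : List String) y =>
        if PySem.List.pyGetD seq.toList y ' ' = 'K' then a ++ [String.ofList (PySem.Chars.slice (List.replicate 10 'X' ++ seq.toList ++ List.replicate 10 'X') (some y) (some (y + 21)))] else a)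
      (g := fun (a : List Int) y =>
        if PySem.List.pyGetD seq.toList y ' ' = 'K' then a ++ [y + 1] else a)]
  rw [PySem.List.foldl_append_ite, PySem.List.foldl_append_ite, PySem.List.foldl_append_ite]
  unfold contrib kIdx winB padX
  rfl

theorem outerB_eq (lst : List String) :
    protein_sequence_input_alt lst
      = ((pairsOfAlt lst).flatMap (fun p => (contrib p).1),
         (pairsOfAlt lst).flatMap (fun p => (contrib p).2.1),
         (pairsOfAlt lst).flatMap (fun p => (contrib p).2.2)) := by
  unfold protein_sequence_input_alt
  suffices h : ∀ (ps : List (String × String)) (acc : List String × List String × List Int),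
      ps.foldl (fun acc pq =>
        (PySem.List.enumerate pq.2.toList).foldl
          (fun (a2 : List String × List String × List Int) p =>
            if p.2 = 'K' then
              (a2.1 ++ [pq.1],
               a2.2.1 ++ [String.ofList (PySem.Chars.slice (List.replicate 10 'X' ++ pq.2.toList ++ List.replicate 10 'X') (some p.1) (some (p.1 + 21)))],
               a2.2.2 ++ [p.1 + 1])
            else a2) acc) acc
      = (acc.1 ++ ps.flatMap (fun p => (contrib p).1),
         acc.2.1 ++ ps.flatMap (fun p => (contrib p).2.1),
         acc.2.2 ++ ps.flatMap (fun p => (contrib p).2.2)) by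
    simpa using h (pairsOfAlt lst) ([], [], [])
  intro ps
  induction ps with
  | nil => intro acc; simp
  | cons q t ih =>
    intro acc
    rw [List.foldl_cons, innerB_eq q.1 q.2 acc, ih]
    simp [List.append_assoc]

theorem outerA_eq (lst : List String) :
    protein_sequence_input lst
      = ((pairsOfAlt lst).flatMap (fun p => (contrib p).1),
         (pairsOfAlt lst).flatMap (fun p => (contrib p).2.1),
         (pairsOfAlt lst).flatMap (fun p => (contrib p).2.2)) := by
  suffices h : ∀ (xs : List String) (n : Int), PySem.Int.mod n 2 = 0 →
      ∀ (acc : List String × List String × List Int × String), ∃ pid',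
      (PySem.List.enumerate xs n).foldl
        (fun (acc : List String × List String × List Int × String) p =>
          if PySem.Int.mod p.1 2 = 0 then
            (acc.1, acc.2.1, acc.2.2.1, p.2)
          else
            let mk := find_mers_with_K p.2
            (acc.1 ++ PySem.List.pyRepeat [acc.2.2.2] (PySem.List.len mk.1),
             acc.2.1 ++ mk.1, acc.2.2.1 ++ mk.2, acc.2.2.2)) acc
      = (acc.1 ++ (pairsOfAlt xs).flatMap (fun p => (contrib p).1),
         acc.2.1 ++ (pairsOfAlt xs).flatMap (fun p => (contrib p).2.1),
         acc.2.2.1 ++ (pairsOfAlt xs).flatMap (fun p => (contrib p).2.2),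
         pid') by
    obtain ⟨pid', hp⟩ := h lst 0 (by decide) ([], [], [], "")
    unfold protein_sequence_input
    dsimp only
    rw [hp]
    simp
  intro xs
  induction xs using pairsOfAlt.induct with
  | case1 =>
    intro n hn acc
    exact ⟨acc.2.2.2, by simp [pairsOfAlt, PySem.List.enumerate]⟩
  | case2 x =>
    intro n hn acc
    refine ⟨x, ?_⟩
    show List.foldl _ acc ((n, x) :: PySem.List.enumerate ([] : List String) (n + 1)) = _
    rw [List.foldl_cons]
    dsimp only
    rw [if_pos hn]
    simp [pairsOfAlt, PySem.List.enumerate]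
  | case3 x y rest ih =>
    intro n hn acc
    have hn1 : PySem.Int.mod (n + 1) 2 = 1 := by
      rw [PySem.Int.mod_eq_emod_of_pos (by omega : (0:Int) < 2)] at hn ⊢
      omega
    have hn2 : PySem.Int.mod (n + 1 + 1) 2 = 0 := by
      rw [PySem.Int.mod_eq_emod_of_pos (by omega : (0:Int) < 2)] at hn ⊢
      omega
    show ∃ pid', List.foldl _ acc ((n, x) :: (n + 1, y) :: PySem.List.enumerate rest (n + 1 + 1)) = _
    rw [List.foldl_cons, List.foldl_cons]
    dsimp only
    rw [if_pos hn, if_neg (by rw [hn1]; exact one_ne_zero)]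
    obtain ⟨pid', hp⟩ := ih (n + 1 + 1) hn2
      (acc.1 ++ PySem.List.pyRepeat [x] (PySem.List.len (find_mers_with_K y).1),
       acc.2.1 ++ (find_mers_with_K y).1, acc.2.2.1 ++ (find_mers_with_K y).2, x)
    refine ⟨pid', ?_⟩
    rw [hp]
    dsimp only
    rw [find_eq y]
    simp only [pairsOfAlt, List.flatMap_cons, contrib, PySem.List.len_eq, PySem.List.pyRepeat_singleton]
    refine Prod.ext ?_ (Prod.ext ?_ (Prod.ext ?_ rfl)) <;>
      simp [List.append_assoc, List.map_const']

-- ===== VERDICT (by name: the statement is the Claim_ definition above) =====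
theorem protein_sequence_input_spec : Claim_equal_protein_sequence_input := by
  intro lst _
  unfold Spec_protein_sequence_input
  rw [outerA_eq, outerB_eq]
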